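-- pv_equiv track=rewrite | github.com/40a/phi | phi/__init__.py | _to_pdoc_markdown
-- ===== SOURCE A (Python) =====
-- def _to_pdoc_markdown(doc):
--     indent = False
--     lines = []
--
--     for line in doc.split('\n'):
--         if "```" in line:
--             indent = not indent
--             line = line.replace("```python", '')
--             line = line.replace("```", '')
--
--         if indent:
--             line = "    " + line
--
--         lines.append(line)
--
--     return '\n'.join(lines)
-- ===== SOURCE B (Python) =====
-- def _render(line, fence, parity):
--     if fence:
--         line = line.replace("```python", '').replace("```", '')
--     return "    " + line if parity else line
--
--
-- def _to_pdoc_markdown(doc):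
--     raw = doc.split('\n')
--     fences = ["```" in ln for ln in raw]
--     parities = []
--     total = 0
--     for f in fences:
--         total += f
--         parities.append(total % 2 == 1)
--     return '\n'.join(_render(ln, f, p) for ln, f, p in zip(raw, fences, parities))
-- ===== Notes on version B (the rewrite author's own statement) =====
-- stated objective: alternative
-- what changed: Replaces A's single stateful toggle loop by a two-phase pipeline: first a fence table and a running-count parity table are built, then a separate stateless map over zip(lines, fences, parities) renders each line and joins.
import Mathlib
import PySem

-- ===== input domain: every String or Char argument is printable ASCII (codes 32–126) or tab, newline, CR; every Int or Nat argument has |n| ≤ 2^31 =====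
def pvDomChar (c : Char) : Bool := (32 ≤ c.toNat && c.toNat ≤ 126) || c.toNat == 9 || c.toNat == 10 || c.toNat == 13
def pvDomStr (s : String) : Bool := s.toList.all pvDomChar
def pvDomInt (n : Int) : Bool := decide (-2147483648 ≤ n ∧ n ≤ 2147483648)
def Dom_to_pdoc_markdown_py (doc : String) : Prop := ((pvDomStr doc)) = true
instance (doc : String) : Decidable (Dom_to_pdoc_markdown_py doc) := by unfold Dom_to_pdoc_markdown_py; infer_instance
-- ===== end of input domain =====

-- B builds a fence table and a prefix-parity table first, then renders each line in a
-- separate stateless mapping pass; A toggles an indent flag inline in one loop. Same values.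

-- ===== PORT A =====
def pvStepA (st : Bool × List String) (line : String) : Bool × List String :=
  let (indent, line) :=
    if PySem.Str.isIn "```" line then
      (!st.1, PySem.Str.replace (PySem.Str.replace line "```python" "") "```" "")
    else (st.1, line)
  let line := if indent then "    " ++ line else line
  (indent, st.2 ++ [line])

def to_pdoc_markdown_py (doc : String) : String :=
  -- doc.split('\n'): PySem.Chars.splitOn is exact for a nonempty separator
  let st := (((PySem.Chars.splitOn doc.toList "\n".toList).map (fun cs => String.ofList cs)).foldl pvStepA (false, []) : Bool × List String)
  PySem.Str.join "\n" st.2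

-- ===== PORT B =====
def pvRender (line : String) (fence parity : Bool) : String :=
  let line := if fence then PySem.Str.replace (PySem.Str.replace line "```python" "") "```" "" else line
  if parity then "    " ++ line else line

def pvStepB (st : List Bool × Int) (f : Bool) : List Bool × Int :=
  let total := st.2 + (if f then 1 else 0)
  (st.1 ++ [decide (PySem.Int.mod total 2 = 1)], total)

def to_pdoc_markdown_py_alt (doc : String) : String :=
  -- doc.split('\n'): PySem.Chars.splitOn is exact for a nonempty separator
  let raw := (PySem.Chars.splitOn doc.toList "\n".toList).map (fun cs => String.ofList cs)
  let fences := raw.map (fun ln => PySem.Str.isIn "```" ln)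
  let parities := (fences.foldl pvStepB ([], 0)).1
  PySem.Str.join "\n" ((raw.zip (fences.zip parities)).map (fun t => pvRender t.1 t.2.1 t.2.2))

-- ===== PRECONDITION & SPEC =====
def Spec_to_pdoc_markdown_py (doc : String) (out : String) : Prop := out = to_pdoc_markdown_py_alt doc
instance (doc : String) (out : String) : Decidable (Spec_to_pdoc_markdown_py doc out) := by unfold Spec_to_pdoc_markdown_py; infer_instance

-- ===== CLAIM (what is proved, stated in full; the proofs are below) =====
def Claim_equal_to_pdoc_markdown_py : Prop := ∀ (doc : String), Dom_to_pdoc_markdown_py doc → Spec_to_pdoc_markdown_py doc (to_pdoc_markdown_py doc)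

-- ===== LEMMAS AND PROOFS =====

-- reference: the rendered lines, with the inclusive fence parity threaded through
def pvGo : List String → Bool → List String
  | [], _ => []
  | l :: ls, b =>
    let f := PySem.Str.isIn "```" l
    pvRender l f (b ^^ f) :: pvGo ls (b ^^ f)

lemma pvA_fold (ls : List String) (b : Bool) (acc : List String) :
    (ls.foldl pvStepA (b, acc)).2 = acc ++ pvGo ls b := by
  induction ls generalizing b acc with
  | nil => simp [pvGo]
  | cons l ls ih =>
    cases hf : PySem.Str.isIn "```" l with
    | true =>
      cases b <;>
        simp only [List.foldl_cons, pvStepA, pvGo, pvRender, hf, Bool.not_true,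
          Bool.not_false, Bool.xor_true, if_true, if_false,
          Bool.false_eq_true, ih, List.append_assoc,
          List.singleton_append]
    | false =>
      cases b <;>
        simp only [List.foldl_cons, pvStepA, pvGo, pvRender, hf, Bool.xor_false,
          Bool.false_eq_true, ite_true, ite_false, ih, List.append_assoc,
          List.singleton_append]

-- parity bit list from a running count
def pvBits : List Bool → Int → List Bool
  | [], _ => []
  | f :: fs, t =>
    let t' := t + (if f then 1 else 0)
    decide (PySem.Int.mod t' 2 = 1) :: pvBits fs t'

lemma pvB_fold (fs : List Bool) (t : Int) (acc : List Bool) :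
    (fs.foldl pvStepB (acc, t)).1 = acc ++ pvBits fs t := by
  induction fs generalizing t acc with
  | nil => simp [pvBits]
  | cons f fs ih => simp [List.foldl_cons, pvStepB, ih, pvBits]

-- parity bit list from a boolean seed
def pvPar : List Bool → Bool → List Bool
  | [], _ => []
  | f :: fs, b => (b ^^ f) :: pvPar fs (b ^^ f)

lemma pvBits_eq_pvPar (fs : List Bool) (t : Int) :
    pvBits fs t = pvPar fs (decide (PySem.Int.mod t 2 = 1)) := by
  induction fs generalizing t with
  | nil => rfl
  | cons f fs ih =>
    have hm : ∀ a : Int, PySem.Int.mod a 2 = a % 2 := fun a =>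
      PySem.Int.mod_eq_emod_of_pos (by norm_num)
    cases f with
    | false => simpa [pvBits, pvPar] using ih t
    | true =>
      have hb : decide (PySem.Int.mod (t + 1) 2 = 1)
          = !decide (PySem.Int.mod t 2 = 1) := by
        rw [hm, hm]
        rcases Int.emod_two_eq t with h | h
        · have h1 : (t + 1) % 2 = 1 := by omega
          rw [h, h1]; rfl
        · have h1 : (t + 1) % 2 = 0 := by omega
          rw [h, h1]; rfl
      simp only [pvBits, pvPar, Bool.xor_true, ite_true]
      rw [hb, ih (t + 1), hb]

lemma pvZipMap (ls : List String) (b : Bool) :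
    ((ls.zip ((ls.map (fun ln => PySem.Str.isIn "```" ln)).zip
        (pvPar (ls.map (fun ln => PySem.Str.isIn "```" ln)) b))).map
      (fun t => pvRender t.1 t.2.1 t.2.2)) = pvGo ls b := by
  induction ls generalizing b with
  | nil => rfl
  | cons l ls ih =>
    simp only [List.map_cons, pvPar, List.zip_cons_cons, pvGo]
    rw [ih]

-- ===== VERDICT (by name: the statement is the Claim_ definition above) =====
theorem to_pdoc_markdown_py_spec : Claim_equal_to_pdoc_markdown_py := by
  intro doc _
  show to_pdoc_markdown_py doc = to_pdoc_markdown_py_alt doc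
  simp only [to_pdoc_markdown_py, to_pdoc_markdown_py_alt]
  rw [pvA_fold, pvB_fold, pvBits_eq_pvPar]
  rw [show decide (PySem.Int.mod 0 2 = 1) = false from rfl]
  simp only [List.nil_append]
  rw [pvZipMap]
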